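-- pv_equiv track=rewrite | github.com/HeinzHermann/Marvin | Uni_Informatik/Semester1/PRG1 & EPR1/Einführung in die Programmierung (EPR1)/Übungen/Übung 5/Pah_Tum0.py | score_calculator
-- ===== SOURCE A (Python) =====
-- def score_calculator(list_score):
--     score = 0
--     for element in list_score:
--         if element == 3:
--             score += 3
--         elif element == 4:
--             score += 10
--         elif element == 5:
--             score += 25
--         elif element == 6:
--             score += 56
--         elif element == 7:
--             score += 119
--     return(score)
-- ===== SOURCE B (Python) =====
-- SCORE_TABLE = ((3, 3), (4, 10), (5, 25), (6, 56), (7, 119))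
--
-- def score_calculator(list_score):
--     return sum(points * list_score.count(value) for value, points in SCORE_TABLE)
-- ===== Notes on version B (the rewrite author's own statement) =====
-- stated objective: alternative
-- what changed: Replaces the per-element if/elif branch chain with a table-driven computation: iterate over the five (value, points) table entries and multiply each points by list_score.count(value), so the outer loop runs over the table, not over the list.
import Mathlib
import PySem

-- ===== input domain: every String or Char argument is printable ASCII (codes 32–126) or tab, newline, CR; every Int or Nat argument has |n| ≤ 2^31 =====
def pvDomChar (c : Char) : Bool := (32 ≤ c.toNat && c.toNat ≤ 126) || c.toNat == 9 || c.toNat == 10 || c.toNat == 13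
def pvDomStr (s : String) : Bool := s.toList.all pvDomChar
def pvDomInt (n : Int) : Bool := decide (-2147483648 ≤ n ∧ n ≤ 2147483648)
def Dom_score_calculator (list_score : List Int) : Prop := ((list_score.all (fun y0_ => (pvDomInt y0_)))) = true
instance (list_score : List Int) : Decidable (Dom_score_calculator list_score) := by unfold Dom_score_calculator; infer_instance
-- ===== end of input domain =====

-- B replaces A's per-element if/elif chain with a table-driven sum: for each (value, points) table entry, add points * count(value) (objective: alternative).


-- ===== PORT A =====
-- Port of A: fold over the list with the literal if/elif chain.
def score_calculator (list_score : List Int) : Int :=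
  list_score.foldl (fun score element =>
    if element = 3 then score + 3
    else if element = 4 then score + 10
    else if element = 5 then score + 25
    else if element = 6 then score + 56
    else if element = 7 then score + 119
    else score) 0

-- ===== PORT B =====
-- Port of B: the (value, points) table; sum points * count(value) over its entries.
def scoreTable : List (Int × Int) := [(3, 3), (4, 10), (5, 25), (6, 56), (7, 119)]

def score_calculator_alt (list_score : List Int) : Int :=
  scoreTable.foldl (fun acc vp => acc + vp.2 * (list_score.count vp.1 : Int)) 0

-- ===== PRECONDITION & SPEC =====
def Spec_score_calculator (list_score : List Int) (out : Int) : Prop := out = score_calculator_alt list_score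
instance (list_score : List Int) (out : Int) : Decidable (Spec_score_calculator list_score out) := by unfold Spec_score_calculator; infer_instance

-- ===== CLAIM (what is proved, stated in full; the proofs are below) =====
def Claim_equal_score_calculator : Prop := ∀ (list_score : List Int), Dom_score_calculator list_score → Spec_score_calculator list_score (score_calculator list_score)

-- ===== LEMMAS AND PROOFS =====
theorem fold_eq_counts (xs : List Int) (acc : Int) :
    xs.foldl (fun score element =>
      if element = 3 then score + 3
      else if element = 4 then score + 10
      else if element = 5 then score + 25
      else if element = 6 then score + 56
      else if element = 7 then score + 119
      else score) acc
    = acc + 3 * (xs.count 3 : Int) + 10 * (xs.count 4 : Int) + 25 * (xs.count 5 : Int)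
        + 56 * (xs.count 6 : Int) + 119 * (xs.count 7 : Int) := by
  induction xs generalizing acc with
  | nil => simp
  | cons e t ih =>
    simp only [List.foldl_cons, List.count_cons]
    by_cases h3 : e = 3
    · subst h3; rw [ih]; simp; push_cast; ring
    by_cases h4 : e = 4
    · subst h4; rw [if_neg (by omega), if_pos rfl, ih]; simp; push_cast; ring
    by_cases h5 : e = 5
    · subst h5; rw [if_neg (by omega), if_neg (by omega), if_pos rfl, ih]; simp; push_cast; ring
    by_cases h6 : e = 6
    · subst h6; rw [if_neg (by omega), if_neg (by omega), if_neg (by omega), if_pos rfl, ih]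
      simp; push_cast; ring
    by_cases h7 : e = 7
    · subst h7
      rw [if_neg (by omega), if_neg (by omega), if_neg (by omega), if_neg (by omega), if_pos rfl, ih]
      simp; push_cast; ring
    · rw [if_neg h3, if_neg h4, if_neg h5, if_neg h6, if_neg h7, ih]
      simp [h3, h4, h5, h6, h7, beq_iff_eq]

-- ===== VERDICT (by name: the statement is the Claim_ definition above) =====
theorem score_calculator_spec : Claim_equal_score_calculator := by
  intro xs _
  unfold Spec_score_calculator score_calculator score_calculator_alt scoreTable
  rw [fold_eq_counts]
  simp [List.foldl]
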